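-- pv_equiv track=rewrite | github.com/Cheetos/Gran-Premio-Solutions | G.py | DFS
-- ===== SOURCE A (Python) =====
-- def DFS(i, n, v, gold, graph):
--     max_gold = 0 # We haven't extracted any gold yet
--
--     # Attempt to visit other sections from section i
--     for j in range(i + graph[i]["a"], i + graph[i]["b"] + 1):
--         # Visit only sections 0 to n-1
--         if j >= n:
--             break
--         if v[j] == -1:
--             # We haven't visit section j, visit it and get the the maximum
--             # gold we can extract from there
--             max_gold = max(max_gold, DFS(j, n, v, gold, graph))
--         else:
--             # If we have visited section j before, NOT visit again, just retrieve
--             # the maximum gold from that section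
--             max_gold = max(max_gold, v[j])
--
--     # The maximum gold we can extract from current section i is gold[i] + max_gold
--     v[i] = gold[i] + max_gold
--     return v[i]
-- ===== SOURCE B (Python) =====
-- def DFS(i, n, v, gold, graph):
--     # Reachability pass (following edges only into unvisited sections), then a
--     # descending dynamic-programming sweep over the reachable set.
--     # Computes the return value without mutating v.
--     reach = set()
--
--     def collect(k):
--         if k in reach:
--             return
--         reach.add(k)
--         for j in range(k + graph[k]["a"], min(k + graph[k]["b"] + 1, n)):
--             if v[j] == -1:
--                 collect(j)
--
--     collect(i)
--     w = list(v)
--     for k in sorted(reach, reverse=True):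
--         best = 0
--         for j in range(k + graph[k]["a"], min(k + graph[k]["b"] + 1, n)):
--             best = max(best, w[j])
--         w[k] = gold[k] + best
--     return w[i]
-- ===== Notes on version B (the rewrite author's own statement) =====
-- stated objective: alternative
-- what changed: Replaces A's memoized recursive DFS (which writes results into v in place) with a reachability pass over the sections followed by a descending dynamic-programming sweep over exactly the reachable set using the same recurrence; B does not mutate v. Pre_ excludes inputs where A recurses through non-forward edges (a < 1): there A can raise, loop, or return a memo-order-dependent value.
import Mathlib
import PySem

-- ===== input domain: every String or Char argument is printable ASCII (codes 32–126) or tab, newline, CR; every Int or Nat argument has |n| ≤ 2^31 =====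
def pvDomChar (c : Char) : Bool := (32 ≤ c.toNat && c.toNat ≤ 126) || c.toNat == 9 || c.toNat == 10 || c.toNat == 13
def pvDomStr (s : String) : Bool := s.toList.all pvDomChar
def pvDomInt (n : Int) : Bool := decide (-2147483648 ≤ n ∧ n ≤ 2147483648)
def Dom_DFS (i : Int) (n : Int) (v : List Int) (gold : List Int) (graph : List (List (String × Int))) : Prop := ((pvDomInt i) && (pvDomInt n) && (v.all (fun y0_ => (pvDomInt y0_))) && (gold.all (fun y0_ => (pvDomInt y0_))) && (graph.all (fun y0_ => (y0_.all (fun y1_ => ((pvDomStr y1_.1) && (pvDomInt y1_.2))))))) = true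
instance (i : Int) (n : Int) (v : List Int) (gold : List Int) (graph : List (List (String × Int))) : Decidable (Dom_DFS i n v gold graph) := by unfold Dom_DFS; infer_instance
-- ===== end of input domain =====

-- B replaces A's memoized recursive DFS by a reachability pass plus a descending DP sweep over the
-- reachable sections (same recurrence); equivalence is about the RETURN value only: A writes memo
-- values into v in place, B does not mutate v.

-- shared low-level accessors (Python indexing / dict lookup, first-match)
def pvGetD (w : List Int) (m : Int) : Int := (PySem.List.pyGet? w m).getD 0
def pvLook (row : List (String × Int)) (key : String) : Option Int :=
  (row.find? (fun p => p.1 == key)).map (·.2)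
def pvRowA (graph : List (List (String × Int))) (k : Int) : Int :=
  (pvLook ((PySem.List.pyGet? graph k).getD []) "a").getD 0
def pvRowB (graph : List (List (String × Int))) (k : Int) : Int :=
  (pvLook ((PySem.List.pyGet? graph k).getD []) "b").getD 0
-- the successor index range of section k, clamped at n (range(k+a, min(k+b+1, n)))
def pvRng (n : Int) (graph : List (List (String × Int))) (k : Int) : List Int :=
  PySem.List.pyRange (k + pvRowA graph k) (min (k + pvRowB graph k + 1) n) 1

-- ===== PORT A =====
-- fuel makes the nested recursion total; under Pre_ the fuel n.toNat+1 is never exhausted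
mutual
def dfsA (fuel : Nat) (i n : Int) (v gold : List Int) (graph : List (List (String × Int))) : Int × List Int :=
  match fuel with
  | 0 => (0, v)
  | f + 1 =>
    let p := loopA f (i + pvRowA graph i) (i + pvRowB graph i + 1) n v gold graph 0
    let r := pvGetD gold i + p.1
    (r, PySem.List.pySetD p.2 i r)
  termination_by (fuel, 0)
def loopA (f : Nat) (j hi n : Int) (v gold : List Int) (graph : List (List (String × Int))) (mg : Int) : Int × List Int :=
  if hle : hi ≤ j then (mg, v)
  else if n ≤ j then (mg, v)
  else
    let x := pvGetD v j
    if x = -1 then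
      let p := dfsA f j n v gold graph
      loopA f (j + 1) hi n p.2 gold graph (max mg p.1)
    else
      loopA f (j + 1) hi n v gold graph (max mg x)
  termination_by (f, (hi - j).toNat)
  decreasing_by all_goals exact Prod.Lex.right _ (by omega)
end

def DFS (i : Int) (n : Int) (v : List Int) (gold : List Int) (graph : List (List (String × Int))) : Int :=
  (dfsA (n.toNat + 1) i n v gold graph).1

-- ===== PORT B =====
-- reachability pass: visit k, then recurse into every in-range successor j with v[j] == -1
def collectB (fuel : Nat) (k n : Int) (v : List Int) (graph : List (List (String × Int))) (reach : PySem.Set Int) : PySem.Set Int :=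
  match fuel with
  | 0 => reach
  | f + 1 =>
    if PySem.Set.contains reach k then reach
    else
      (pvRng n graph k).foldl
        (fun r j => if pvGetD v j = -1 then collectB f j n v graph r else r)
        (PySem.Set.add reach k)

-- one step of the DP sweep: w[k] = gold[k] + max(w over successors, default 0)
def dpStep (n : Int) (gold : List Int) (graph : List (List (String × Int))) (w : List Int) (k : Int) : List Int :=
  let best := (pvRng n graph k).foldl (fun acc j => max acc (pvGetD w j)) 0
  PySem.List.pySetD w k (pvGetD gold k + best)

def DFS_alt (i : Int) (n : Int) (v : List Int) (gold : List Int) (graph : List (List (String × Int))) : Int :=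
  let reach := collectB (n.toNat + 1) i n v graph PySem.Set.empty
  let w := (PySem.List.sorted reach (fun x => x) true).foldl (dpStep n gold graph) v
  pvGetD w i

-- ===== PRECONDITION & SPEC =====
-- Pre_ is the union of the two regimes on which A's traversal is well defined: PreRec is the task's
-- natural domain (sections 0..n-1 exist in all three lists, every section dict has keys "a","b" with
-- a >= 1, i.e. strictly forward edges as the problem guarantees); preFlat admits any call (including
-- wrapped negative i) whose successor scan meets no unvisited section, so A returns without recursing.
-- Outside both, A recurses through ill-founded edges (a < 1): it can loop forever, raise, or return a
-- value that depends on its memo-visit order (see cites for an input where A still returns).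
def PreRec (i : Int) (n : Int) (v : List Int) (gold : List Int) (graph : List (List (String × Int))) : Prop :=
  0 ≤ i ∧ i < n ∧ n ≤ (v.length : Int) ∧ n ≤ (gold.length : Int) ∧ n ≤ (graph.length : Int) ∧
  ∀ row ∈ graph, 1 ≤ (pvLook row "a").getD 0 ∧ (pvLook row "b").isSome = true

def preFlat (i : Int) (n : Int) (v : List Int) (gold : List Int) (graph : List (List (String × Int))) : Bool :=
  (decide (-(graph.length : Int) ≤ i) && decide (i < (graph.length : Int)) &&
   decide (-(v.length : Int) ≤ i) && decide (i < (v.length : Int)) &&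
   decide (-(gold.length : Int) ≤ i) && decide (i < (gold.length : Int)) &&
   (pvLook ((PySem.List.pyGet? graph i).getD []) "a").isSome &&
   (pvLook ((PySem.List.pyGet? graph i).getD []) "b").isSome) &&
  (decide (min (i + pvRowB graph i + 1) n ≤ i + pvRowA graph i) ||
   (decide (-(v.length : Int) ≤ i + pvRowA graph i) &&
    decide (min (i + pvRowB graph i + 1) n ≤ (v.length : Int)) &&
    (pvRng n graph i).all (fun j => decide (pvGetD v j ≠ -1))))

def Pre_DFS (i : Int) (n : Int) (v : List Int) (gold : List Int) (graph : List (List (String × Int))) : Prop :=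
  preFlat i n v gold graph = true ∨ PreRec i n v gold graph
instance (i : Int) (n : Int) (v : List Int) (gold : List Int) (graph : List (List (String × Int))) : Decidable (Pre_DFS i n v gold graph) := by unfold Pre_DFS PreRec; infer_instance

def pvWitness_DFS : Int × Int × List Int × List Int × (List (List (String × Int))) :=
  (0, 3, [-1, -1, -1], [0, 5, 10], [[("a", 1), ("b", 2)], [("a", 1), ("b", 0)], [("a", 1), ("b", 1)]])

def Spec_DFS (i : Int) (n : Int) (v : List Int) (gold : List Int) (graph : List (List (String × Int))) (out : Int) : Prop := out = DFS_alt i n v gold graph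
instance (i : Int) (n : Int) (v : List Int) (gold : List Int) (graph : List (List (String × Int))) (out : Int) : Decidable (Spec_DFS i n v gold graph out) := by unfold Spec_DFS; infer_instance

-- ===== CLAIM (what is proved, stated in full; the proofs are below) =====
def Claim_equal_DFS : Prop := ∀ (i : Int) (n : Int) (v : List Int) (gold : List Int) (graph : List (List (String × Int))), Dom_DFS i n v gold graph → Pre_DFS i n v gold graph → Spec_DFS i n v gold graph (DFS i n v gold graph)

-- ===== LEMMAS AND PROOFS =====

-- B's intermediate objects, named for the proofs
def reachS (i n : Int) (v : List Int) (graph : List (List (String × Int))) : List Int :=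
  collectB (n.toNat + 1) i n v graph PySem.Set.empty
def sortR (i n : Int) (v : List Int) (graph : List (List (String × Int))) : List Int :=
  PySem.List.sorted (reachS i n v graph) (fun x => x) true
def wB (i n : Int) (v gold : List Int) (graph : List (List (String × Int))) : List Int :=
  (sortR i n v graph).foldl (dpStep n gold graph) v
def bestB (n : Int) (graph : List (List (String × Int))) (w : List Int) (k : Int) : Int :=
  (pvRng n graph k).foldl (fun acc j => max acc (pvGetD w j)) 0
def Closed (n : Int) (v : List Int) (graph : List (List (String × Int))) (S : List Int) (m : Int) : Prop :=
  ∀ x ∈ pvRng n graph m, pvGetD v x = -1 → x ∈ S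
def GoodV (i n : Int) (v gold : List Int) (graph : List (List (String × Int))) (v' : List Int) : Prop :=
  v'.length = v.length ∧ ∀ m : Int, i < m → m < n →
    pvGetD v' m = pvGetD v m ∨
    (m ∈ reachS i n v graph ∧ pvGetD v m = -1 ∧ pvGetD v' m = pvGetD (wB i n v gold graph) m)

theorem alt_eq (i n : Int) (v gold : List Int) (graph : List (List (String × Int))) :
    DFS_alt i n v gold graph = pvGetD (wB i n v gold graph) i := rfl

theorem pvGetD_nonneg (w : List Int) (m : Int) (h0 : 0 ≤ m) : pvGetD w m = w.getD m.toNat 0 := by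
  simp [pvGetD, PySem.List.pyGet?_of_nonneg w h0, List.getD]

theorem pvGetD_set (w : List Int) (k m x : Int) (hk : 0 ≤ k) (hm : 0 ≤ m)
    (hlen : k.toNat < w.length) :
    pvGetD (w.set k.toNat x) m = if m = k then x else pvGetD w m := by
  rw [pvGetD_nonneg _ _ hm, pvGetD_nonneg _ _ hm, List.getD, List.getD]
  by_cases h : m = k
  · subst h; simp [hlen]
  · have : m.toNat ≠ k.toNat := by omega
    simp [List.getElem?_set_ne (Ne.symm this), h]

theorem pvGetD_pySetD_self (w : List Int) (k x : Int) (h1 : -(w.length : Int) ≤ k)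
    (h2 : k < (w.length : Int)) : pvGetD (PySem.List.pySetD w k x) k = x := by
  by_cases h0 : 0 ≤ k
  · rw [PySem.List.pySetD_of_nonneg _ _ h0]
    rw [pvGetD_set w k k x h0 h0 (by omega), if_pos rfl]
  · have hp : PySem.List.pyIdx? w.length k = some (w.length - (-k).toNat) := by
      unfold PySem.List.pyIdx?
      rw [if_neg h0, if_pos (by omega)]
    have hset : PySem.List.pySetD w k x = w.set (w.length - (-k).toNat) x := by
      unfold PySem.List.pySetD PySem.List.pySet?
      rw [hp]
      rfl
    have hlt : w.length - (-k).toNat < w.length := by omega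
    rw [hset]
    unfold pvGetD PySem.List.pyGet?
    rw [List.length_set, hp]
    simp [List.getElem?_set_self hlt]

theorem pvRowA_ge (i n : Int) (v gold : List Int) (graph : List (List (String × Int)))
    (hrec : PreRec i n v gold graph) (k : Int) (h0 : 0 ≤ k) (hk : k < n) :
    1 ≤ pvRowA graph k := by
  obtain ⟨_, _, _, _, hg, hrows⟩ := hrec
  have hlen : k.toNat < graph.length := by omega
  have hget : PySem.List.pyGet? graph k = some graph[k.toNat] := by
    rw [PySem.List.pyGet?_of_nonneg graph h0]
    simp [List.getElem?_eq_getElem hlen]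
  unfold pvRowA
  rw [hget]
  exact (hrows graph[k.toNat] (List.getElem_mem hlen)).1

theorem mem_pvRng (i n : Int) (v gold : List Int) (graph : List (List (String × Int)))
    (hrec : PreRec i n v gold graph) (k : Int) (h0 : 0 ≤ k) (hk : k < n) :
    ∀ x ∈ pvRng n graph k, k + 1 ≤ x ∧ x < n := by
  intro x hx
  have hm := PySem.List.mem_pyRange_one.1 hx
  have ha := pvRowA_ge i n v gold graph hrec k h0 hk
  have h3 : min (k + pvRowB graph k + 1) n ≤ n := min_le_right _ _
  omega

-- ----- the reachability pass -----

theorem Closed_mono (n : Int) (v : List Int) (graph : List (List (String × Int)))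
    (S T : List Int) (m : Int) (hsub : ∀ x ∈ S, x ∈ T) (h : Closed n v graph S m) :
    Closed n v graph T m := fun x hx hv => hsub x (h x hx hv)

-- one invariant bundle for collectB at a given fuel
def CSpec (n : Int) (v : List Int) (graph : List (List (String × Int))) (f : Nat) : Prop :=
  ∀ (k : Int) (r : List Int), 0 ≤ k → k < n → (n - k).toNat < f →
    (∀ m ∈ r, m ∈ collectB f k n v graph r) ∧ (k ∈ collectB f k n v graph r) ∧
    (∀ m ∈ collectB f k n v graph r, m ∈ r ∨ (k ≤ m ∧ m < n)) ∧
    (∀ m ∈ collectB f k n v graph r, m ∈ r ∨ Closed n v graph (collectB f k n v graph r) m) ∧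
    (∀ m ∈ collectB f k n v graph r, m ∈ r ∨ m = k ∨ pvGetD v m = -1) ∧
    (r.Nodup → (collectB f k n v graph r).Nodup)

theorem collect_fold (n : Int) (v : List Int) (graph : List (List (String × Int))) (f : Nat)
    (hIH : CSpec n v graph f) :
    ∀ (l : List Int) (r0 : List Int) (lo : Int), (∀ x ∈ l, lo ≤ x ∧ x < n) → 0 ≤ lo →
    (n - lo).toNat < f →
    (∀ m ∈ r0, m ∈ l.foldl (fun r j => if pvGetD v j = -1 then collectB f j n v graph r else r) r0) ∧
    (∀ x ∈ l, pvGetD v x = -1 → x ∈ l.foldl (fun r j => if pvGetD v j = -1 then collectB f j n v graph r else r) r0) ∧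
    (∀ m ∈ l.foldl (fun r j => if pvGetD v j = -1 then collectB f j n v graph r else r) r0, m ∈ r0 ∨ (lo ≤ m ∧ m < n)) ∧
    (∀ m ∈ l.foldl (fun r j => if pvGetD v j = -1 then collectB f j n v graph r else r) r0, m ∈ r0 ∨ Closed n v graph (l.foldl (fun r j => if pvGetD v j = -1 then collectB f j n v graph r else r) r0) m) ∧
    (∀ m ∈ l.foldl (fun r j => if pvGetD v j = -1 then collectB f j n v graph r else r) r0, m ∈ r0 ∨ pvGetD v m = -1) ∧
    (r0.Nodup → (l.foldl (fun r j => if pvGetD v j = -1 then collectB f j n v graph r else r) r0).Nodup) := by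
  intro l
  induction l with
  | nil =>
    intro r0 lo _ _ _
    exact ⟨fun m hm => hm, fun x hx => absurd hx (List.not_mem_nil),
      fun m hm => Or.inl hm, fun m hm => Or.inl hm, fun m hm => Or.inl hm, fun h => h⟩
  | cons x l ih =>
    intro r0 lo hmem h0lo hf
    have hx := hmem x List.mem_cons_self
    simp only [List.foldl_cons]
    by_cases hvx : pvGetD v x = -1
    · rw [if_pos hvx]
      have hfx : (n - x).toNat < f := by omega
      obtain ⟨s1, s2, s3, s4, s5, s6⟩ := hIH x r0 (by omega) hx.2 hfx
      obtain ⟨f1, f2, f3, f4, f5, f6⟩ := ih (collectB f x n v graph r0) lo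
        (fun y hy => hmem y (List.mem_cons_of_mem _ hy)) h0lo hf
      refine ⟨fun m hm => f1 m (s1 m hm), ?_, ?_, ?_, ?_, fun h => f6 (s6 h)⟩
      · intro y hy hvy
        rcases List.mem_cons.1 hy with h | h
        · subst h; exact f1 y s2
        · exact f2 y h hvy
      · intro m hm
        rcases f3 m hm with h | h
        · rcases s3 m h with h' | h'
          · exact Or.inl h'
          · exact Or.inr ⟨by omega, h'.2⟩
        · exact Or.inr h
      · intro m hm
        rcases f4 m hm with h | h
        · rcases s4 m h with h' | h'
          · exact Or.inl h'
          · exact Or.inr (Closed_mono n v graph _ _ m f1 h')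
        · exact Or.inr h
      · intro m hm
        rcases f5 m hm with h | h
        · rcases s5 m h with h' | h' | h'
          · exact Or.inl h'
          · exact Or.inr (h' ▸ hvx)
          · exact Or.inr h'
        · exact Or.inr h
    · rw [if_neg hvx]
      obtain ⟨f1, f2, f3, f4, f5, f6⟩ := ih r0 lo
        (fun y hy => hmem y (List.mem_cons_of_mem _ hy)) h0lo hf
      refine ⟨f1, ?_, f3, f4, f5, f6⟩
      intro y hy hvy
      rcases List.mem_cons.1 hy with h | h
      · subst h; exact absurd hvy hvx
      · exact f2 y h hvy

theorem collect_main (i n : Int) (v gold : List Int) (graph : List (List (String × Int)))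
    (hrec : PreRec i n v gold graph) : ∀ f : Nat, CSpec n v graph f := by
  intro f
  induction f with
  | zero => intro k r _ _ hf; omega
  | succ f ihf =>
    intro k r h0 hkn hf
    rw [collectB]
    by_cases hc : k ∈ r
    · rw [if_pos ((PySem.Set.contains_iff r k).2 hc)]
      exact ⟨fun m hm => hm, hc, fun m hm => Or.inl hm, fun m hm => Or.inl hm,
        fun m hm => Or.inl hm, fun h => h⟩
    · rw [if_neg (by rw [PySem.Set.contains_iff]; exact hc)]
      have hadd : PySem.Set.add r k = r ++ [k] := PySem.Set.add_of_not_mem hc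
      have ha := pvRowA_ge i n v gold graph hrec k h0 hkn
      obtain ⟨f1, f2, f3, f4, f5, f6⟩ := collect_fold n v graph f ihf (pvRng n graph k)
        (PySem.Set.add r k) (k + 1) (mem_pvRng i n v gold graph hrec k h0 hkn)
        (by omega) (by omega)
      have hrsub : ∀ m ∈ r, m ∈ PySem.Set.add r k := by
        intro m hm; rw [hadd]; exact List.mem_append_left _ hm
      have hksub : k ∈ PySem.Set.add r k := by
        rw [hadd]; exact List.mem_append_right _ List.mem_cons_self
      have hmem_add : ∀ m ∈ PySem.Set.add r k, m ∈ r ∨ m = k := by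
        intro m hm
        rw [hadd] at hm
        rcases List.mem_append.1 hm with h' | h'
        · exact Or.inl h'
        · rcases List.mem_cons.1 h' with h'' | h''
          · exact Or.inr h''
          · exact absurd h'' (List.not_mem_nil)
      refine ⟨fun m hm => f1 m (hrsub m hm), f1 k hksub, ?_, ?_, ?_, ?_⟩
      · intro m hm
        rcases f3 m hm with h | h
        · rcases hmem_add m h with h' | h'
          · exact Or.inl h'
          · exact Or.inr ⟨by omega, by omega⟩
        · exact Or.inr ⟨by omega, h.2⟩
      · intro m hm
        rcases f4 m hm with h | h
        · rcases hmem_add m h with h' | h'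
          · exact Or.inl h'
          · subst h'
            exact Or.inr f2
        · exact Or.inr h
      · intro m hm
        rcases f5 m hm with h | h
        · rcases hmem_add m h with h' | h'
          · exact Or.inl h'
          · exact Or.inr (Or.inl h')
        · exact Or.inr (Or.inr h)
      · intro hnd
        apply f6
        rw [hadd]
        exact List.Nodup.append hnd (List.nodup_singleton _)
          (by intro z hz1 hz2
              rcases List.mem_cons.1 hz2 with h | h
              · subst h; exact hc hz1
              · exact absurd h (List.not_mem_nil))

theorem reach_facts (i n : Int) (v gold : List Int) (graph : List (List (String × Int)))
    (hrec : PreRec i n v gold graph) :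
    i ∈ reachS i n v graph ∧ (∀ m ∈ reachS i n v graph, i ≤ m ∧ m < n) ∧
    (∀ m ∈ reachS i n v graph, Closed n v graph (reachS i n v graph) m) ∧
    (∀ m ∈ reachS i n v graph, m = i ∨ pvGetD v m = -1) ∧
    (reachS i n v graph).Nodup := by
  have h0 : 0 ≤ i := hrec.1
  have hin : i < n := hrec.2.1
  have hf : (n - i).toNat < n.toNat + 1 := by omega
  obtain ⟨c1, c2, c3, c4, c5, c6⟩ := collect_main i n v gold graph hrec (n.toNat + 1) i PySem.Set.empty h0 hin hf
  refine ⟨c2, ?_, ?_, ?_, c6 (List.nodup_nil)⟩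
  · intro m hm
    rcases c3 m hm with h | h
    · exact absurd h (List.not_mem_nil)
    · exact h
  · intro m hm
    rcases c4 m hm with h | h
    · exact absurd h (List.not_mem_nil)
    · exact h
  · intro m hm
    rcases c5 m hm with h | h
    · exact absurd h (List.not_mem_nil)
    · exact h

-- ----- the DP sweep -----

theorem length_dpStep (n : Int) (gold : List Int) (graph : List (List (String × Int)))
    (w : List Int) (k : Int) : (dpStep n gold graph w k).length = w.length := by
  unfold dpStep; dsimp only
  exact PySem.List.length_pySetD ..

theorem dpStep_ne (n : Int) (gold : List Int) (graph : List (List (String × Int)))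
    (w : List Int) (k m : Int) (hk : 0 ≤ k) (hm : 0 ≤ m) (hne : m ≠ k) :
    pvGetD (dpStep n gold graph w k) m = pvGetD w m := by
  unfold dpStep; dsimp only
  rw [PySem.List.pySetD_of_nonneg _ _ hk]
  by_cases hlen : k.toNat < w.length
  · rw [pvGetD_set w k m _ hk hm hlen, if_neg hne]
  · rw [List.set_eq_of_length_le (by omega)]

theorem dpRun_preserve (n : Int) (gold : List Int) (graph : List (List (String × Int))) :
    ∀ (l : List Int) (w : List Int) (m : Int), (∀ p ∈ l, 0 ≤ p) → 0 ≤ m → m ∉ l →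
    pvGetD (l.foldl (dpStep n gold graph) w) m = pvGetD w m := by
  intro l
  induction l with
  | nil => intro w m _ _ _; rfl
  | cons a l ih =>
    intro w m hp hm hmem
    simp only [List.foldl_cons]
    rw [ih _ m (fun p hp' => hp p (List.mem_cons_of_mem _ hp')) hm
      (fun h => hmem (List.mem_cons_of_mem _ h))]
    exact dpStep_ne n gold graph w a m (hp a List.mem_cons_self) hm
      (fun h => hmem (h ▸ List.mem_cons_self))

theorem dp_char (n : Int) (v gold : List Int) (graph : List (List (String × Int))) :
    ∀ (l : List Int) (w : List Int), l.Pairwise (fun a b : Int => b < a) →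
    (∀ p ∈ l, 0 ≤ p ∧ p < n ∧ p < (v.length : Int) ∧ 1 ≤ pvRowA graph p) →
    w.length = v.length →
    ∀ k ∈ l, pvGetD (l.foldl (dpStep n gold graph) w) k =
      pvGetD gold k + bestB n graph (l.foldl (dpStep n gold graph) w) k := by
  intro l
  induction l with
  | nil => intro w _ _ _ k hk; exact absurd hk (List.not_mem_nil)
  | cons x l ih =>
    intro w hpw hb hlen k hk
    have hx := hb x List.mem_cons_self
    have hxlt : ∀ b ∈ l, b < x := (List.pairwise_cons.1 hpw).1
    have hlen1 : (dpStep n gold graph w x).length = w.length := length_dpStep ..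
    -- indices read by x's best are > x, hence outside x :: l, hence stable
    have hsucc : ∀ j ∈ pvRng n graph x, x < j := by
      intro j hj
      have := PySem.List.mem_pyRange_one.1 hj
      have := hx.2.2.2
      omega
    have hstable : ∀ j : Int, x < j → 0 ≤ j →
        pvGetD (l.foldl (dpStep n gold graph) (dpStep n gold graph w x)) j
          = pvGetD w j := by
      intro j hj h0j
      rw [dpRun_preserve n gold graph l _ j (fun p hp => (hb p (List.mem_cons_of_mem _ hp)).1)
        h0j (fun hmem => absurd (hxlt j hmem) (by omega))]
      exact dpStep_ne n gold graph w x j hx.1 h0j (by omega)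
    simp only [List.foldl_cons]
    rcases List.mem_cons.1 hk with hkx | hkl
    · subst hkx
      have hfin : pvGetD (l.foldl (dpStep n gold graph) (dpStep n gold graph w k)) k
          = pvGetD (dpStep n gold graph w k) k := by
        apply dpRun_preserve n gold graph l _ k
          (fun p hp => (hb p (List.mem_cons_of_mem _ hp)).1) hx.1
        intro hmem
        exact absurd (hxlt k hmem) (by omega)
      rw [hfin]
      have hbesteq : bestB n graph w k
          = bestB n graph (l.foldl (dpStep n gold graph) (dpStep n gold graph w k)) k := by
        unfold bestB
        apply PySem.List.foldl_congr_mem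
        intro acc j hj
        have hjx := hsucc j hj
        rw [hstable j hjx (by omega)]
      rw [← hbesteq]
      unfold dpStep
      dsimp only
      rw [PySem.List.pySetD_of_nonneg _ _ hx.1,
        pvGetD_set w k k _ hx.1 hx.1 (by omega), if_pos rfl]
      unfold bestB
      rfl
    · exact ih (dpStep n gold graph w x) (List.pairwise_cons.1 hpw).2
        (fun p hp => hb p (List.mem_cons_of_mem _ hp))
        (by rw [hlen1, hlen]) k hkl

theorem wout (i n : Int) (v gold : List Int) (graph : List (List (String × Int)))
    (hrec : PreRec i n v gold graph) (m : Int) (h0 : 0 ≤ m) (hm : m ∉ reachS i n v graph) :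
    pvGetD (wB i n v gold graph) m = pvGetD v m := by
  obtain ⟨_, hbound, _, _, _⟩ := reach_facts i n v gold graph hrec
  apply dpRun_preserve
  · intro p hp
    have := hbound p ((PySem.List.mem_sorted _ _ _ _).1 hp)
    have h0i : 0 ≤ i := hrec.1
    omega
  · exact h0
  · intro h
    exact hm ((PySem.List.mem_sorted _ _ _ _).1 h)

theorem wrecR (i n : Int) (v gold : List Int) (graph : List (List (String × Int)))
    (hrec : PreRec i n v gold graph) (m : Int) (hm : m ∈ reachS i n v graph) :
    pvGetD (wB i n v gold graph) m = pvGetD gold m + bestB n graph (wB i n v gold graph) m := by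
  obtain ⟨hmem, hbound, _, _, hnd⟩ := reach_facts i n v gold graph hrec
  have h0i : 0 ≤ i := hrec.1
  have hvlen : n ≤ (v.length : Int) := hrec.2.2.1
  apply dp_char n v gold graph (sortR i n v graph) v
  · have hp := PySem.List.sorted_pairwise_rev (reachS i n v graph) (fun x : Int => x)
    have hnd' : (sortR i n v graph).Nodup :=
      ((PySem.List.sorted_perm (reachS i n v graph) (fun x : Int => x) true).nodup_iff).2 hnd
    refine (hp.and hnd').imp ?_
    intro a b h
    obtain ⟨h1, h2⟩ := h
    have h1' : (b : Int) ≤ a := h1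
    omega
  · intro p hp
    have hb := hbound p ((PySem.List.mem_sorted _ _ _ _).1 hp)
    refine ⟨by omega, by omega, by omega, ?_⟩
    exact pvRowA_ge i n v gold graph hrec p (by omega) (by omega)
  · rfl
  · exact (PySem.List.mem_sorted _ _ _ _).2 hm

theorem wB_eq_v (i n : Int) (v gold : List Int) (graph : List (List (String × Int)))
    (hrec : PreRec i n v gold graph) (j : Int) (h0 : 0 ≤ j) (hv : pvGetD v j ≠ -1)
    (hji : j ≠ i) : pvGetD (wB i n v gold graph) j = pvGetD v j := by
  obtain ⟨_, _, _, hunv, _⟩ := reach_facts i n v gold graph hrec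
  apply wout i n v gold graph hrec j h0
  intro hm
  rcases hunv j hm with h | h
  · exact hji h
  · exact hv h

-- ----- A's recursion against the DP values -----

def Pdfs (i n : Int) (v gold : List Int) (graph : List (List (String × Int))) (f : Nat) : Prop :=
  ∀ k v', k ∈ reachS i n v graph → i ≤ k → k < n → (k = i ∨ pvGetD v k = -1) →
    GoodV i n v gold graph v' → (n - k).toNat ≤ f →
    (dfsA f k n v' gold graph).1 = pvGetD gold k + bestB n graph (wB i n v gold graph) k ∧
    GoodV i n v gold graph (dfsA f k n v' gold graph).2

theorem loop_main (i n : Int) (v gold : List Int) (graph : List (List (String × Int)))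
    (hrec : PreRec i n v gold graph) (f : Nat) (hdfs : Pdfs i n v gold graph f) :
    ∀ t : Nat, ∀ k j mg : Int, ∀ v' : List Int, k ∈ reachS i n v graph → i ≤ k → k < n →
    k + pvRowA graph k ≤ j → (n - j).toNat ≤ t →
    GoodV i n v gold graph v' → (n - j).toNat ≤ f →
    (loopA f j (k + pvRowB graph k + 1) n v' gold graph mg).1 =
      (PySem.List.pyRange j (min (k + pvRowB graph k + 1) n) 1).foldl
        (fun acc j' => max acc (pvGetD (wB i n v gold graph) j')) mg ∧
    GoodV i n v gold graph (loopA f j (k + pvRowB graph k + 1) n v' gold graph mg).2 := by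
  have h0i : 0 ≤ i := hrec.1
  obtain ⟨_, _, hcl, _, _⟩ := reach_facts i n v gold graph hrec
  intro t
  induction t with
  | zero =>
    intro k j mg v' hkR hik hkn hlo hle hg hff
    have hnil : PySem.List.pyRange j (min (k + pvRowB graph k + 1) n) 1 = [] :=
      PySem.List.pyRange_one_eq_nil (by have := min_le_right (k + pvRowB graph k + 1) n; omega)
    by_cases hle2 : k + pvRowB graph k + 1 ≤ j
    · rw [loopA, dif_pos hle2, hnil]
      exact ⟨rfl, hg⟩
    · rw [loopA, dif_neg hle2, if_pos (by omega : n ≤ j), hnil]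
      exact ⟨rfl, hg⟩
  | succ t ih =>
    intro k j mg v' hkR hik hkn hlo hle hg hff
    by_cases hle2 : k + pvRowB graph k + 1 ≤ j
    · have hnil : PySem.List.pyRange j (min (k + pvRowB graph k + 1) n) 1 = [] :=
        PySem.List.pyRange_one_eq_nil (by have := min_le_left (k + pvRowB graph k + 1) n; omega)
      rw [loopA, dif_pos hle2, hnil]
      exact ⟨rfl, hg⟩
    by_cases hnj : n ≤ j
    · have hnil : PySem.List.pyRange j (min (k + pvRowB graph k + 1) n) 1 = [] :=
        PySem.List.pyRange_one_eq_nil (by have := min_le_right (k + pvRowB graph k + 1) n; omega)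
      rw [loopA, dif_neg hle2, if_pos hnj, hnil]
      exact ⟨rfl, hg⟩
    · have hjmin : j < min (k + pvRowB graph k + 1) n := by omega
      have hjrng : j ∈ pvRng n graph k := by
        unfold pvRng
        exact PySem.List.mem_pyRange_one.2 ⟨hlo, hjmin⟩
      have haj := pvRowA_ge i n v gold graph hrec k (by omega) hkn
      have hij : i < j := by omega
      rw [loopA, dif_neg hle2, if_neg hnj, PySem.List.pyRange_one_cons hjmin, List.foldl_cons]
      dsimp only
      by_cases hx : pvGetD v' j = -1
      · rw [if_pos hx]
        have hvj : pvGetD v j = -1 := by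
          rcases hg.2 j hij (by omega) with h | h
          · rw [← h]; exact hx
          · exact h.2.1
        have hjR : j ∈ reachS i n v graph := hcl k hkR j hjrng hvj
        have hd := hdfs j v' hjR (by omega) (by omega) (Or.inr hvj) hg (by omega)
        have hwj : pvGetD (wB i n v gold graph) j
            = pvGetD gold j + bestB n graph (wB i n v gold graph) j :=
          wrecR i n v gold graph hrec j hjR
        have e : (dfsA f j n v' gold graph).1 = pvGetD (wB i n v gold graph) j :=
          hd.1.trans hwj.symm
        rw [e]
        exact ih k (j + 1) (max mg (pvGetD (wB i n v gold graph) j))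
          (dfsA f j n v' gold graph).2 hkR hik hkn (by omega) (by omega) hd.2 (by omega)
      · rw [if_neg hx]
        have hwx : pvGetD v' j = pvGetD (wB i n v gold graph) j := by
          rcases hg.2 j hij (by omega) with h | h
          · rw [h, wB_eq_v i n v gold graph hrec j (by omega) (by rw [← h]; exact hx) (by omega)]
          · exact h.2.2
        rw [hwx]
        exact ih k (j + 1) (max mg (pvGetD (wB i n v gold graph) j)) v' hkR hik hkn
          (by omega) (by omega) hg (by omega)

theorem dfs_main (i n : Int) (v gold : List Int) (graph : List (List (String × Int)))
    (hrec : PreRec i n v gold graph) : ∀ f : Nat, Pdfs i n v gold graph f := by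
  intro f
  induction f with
  | zero =>
    intro k v' _ hik hkn _ _ hff
    omega
  | succ f ihf =>
    intro k v' hkR hik hkn hcond hg hff
    have h0i : 0 ≤ i := hrec.1
    have hvlen : n ≤ (v.length : Int) := hrec.2.2.1
    have ha := pvRowA_ge i n v gold graph hrec k (by omega) hkn
    have hloop := loop_main i n v gold graph hrec f ihf
      (n - (k + pvRowA graph k)).toNat k (k + pvRowA graph k) 0 v' hkR hik hkn le_rfl
      le_rfl hg (by omega)
    rw [dfsA]
    dsimp only
    obtain ⟨h1, h2⟩ := hloop
    have hb : (loopA f (k + pvRowA graph k) (k + pvRowB graph k + 1) n v' gold graph 0).1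
        = bestB n graph (wB i n v gold graph) k := by
      rw [h1]; rfl
    constructor
    · rw [hb]
    · constructor
      · rw [PySem.List.length_pySetD]
        exact h2.1
      · intro m him hmn
        by_cases hmk : m = k
        · subst hmk
          have hvk : pvGetD v m = -1 := by
            rcases hcond with h | h
            · omega
            · exact h
          rw [PySem.List.pySetD_of_nonneg _ _ (by omega : (0:Int) ≤ m),
            pvGetD_set _ m m _ (by omega) (by omega) (by rw [h2.1]; omega), if_pos rfl]
          refine Or.inr ⟨hkR, hvk, ?_⟩
          rw [wrecR i n v gold graph hrec m hkR, hb]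
        · rw [PySem.List.pySetD_of_nonneg _ _ (by omega : (0:Int) ≤ k),
            pvGetD_set _ k m _ (by omega) (by omega) (by rw [h2.1]; omega), if_neg hmk]
          exact h2.2 m him hmn

-- ----- the flat regime: the scan meets no unvisited section -----

theorem loop_flat (f : Nat) (n : Int) (v gold : List Int) (graph : List (List (String × Int))) :
    ∀ t : Nat, ∀ j hi mg : Int, (∀ x : Int, j ≤ x → x < min hi n → pvGetD v x ≠ -1) →
    (min hi n - j).toNat ≤ t →
    loopA f j hi n v gold graph mg =
      ((PySem.List.pyRange j (min hi n) 1).foldl (fun acc x => max acc (pvGetD v x)) mg, v) := by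
  intro t
  induction t with
  | zero =>
    intro j hi mg hmem ht
    rw [PySem.List.pyRange_one_eq_nil (by omega), List.foldl_nil, loopA]
    by_cases hle : hi ≤ j
    · rw [dif_pos hle]
    · rw [dif_neg hle, if_pos (by omega : n ≤ j)]
  | succ t ih =>
    intro j hi mg hmem ht
    by_cases hle : hi ≤ j
    · rw [PySem.List.pyRange_one_eq_nil (by omega), List.foldl_nil, loopA, dif_pos hle]
    by_cases hnj : n ≤ j
    · rw [PySem.List.pyRange_one_eq_nil (by omega), List.foldl_nil, loopA, dif_neg hle,
        if_pos hnj]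
    · have hx : pvGetD v j ≠ -1 := hmem j le_rfl (by omega)
      rw [loopA, dif_neg hle, if_neg hnj]
      dsimp only
      rw [if_neg hx, PySem.List.pyRange_one_cons (by omega : j < min hi n), List.foldl_cons]
      exact ih (j + 1) hi (max mg (pvGetD v j))
        (fun x h1 h2 => hmem x (by omega) h2) (by omega)

theorem fold_id_of_no_unvisited (n : Int) (v : List Int) (graph : List (List (String × Int)))
    (f : Nat) : ∀ (l : List Int) (r : List Int), (∀ x ∈ l, pvGetD v x ≠ -1) →
    l.foldl (fun r j => if pvGetD v j = -1 then collectB f j n v graph r else r) r = r := by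
  intro l
  induction l with
  | nil => intro r _; rfl
  | cons a l ih =>
    intro r h
    simp only [List.foldl_cons, if_neg (h a List.mem_cons_self)]
    exact ih r (fun x hx => h x (List.mem_cons_of_mem _ hx))

theorem collect_flat (i n : Int) (v : List Int) (graph : List (List (String × Int)))
    (h : ∀ x ∈ pvRng n graph i, pvGetD v x ≠ -1) :
    collectB (n.toNat + 1) i n v graph PySem.Set.empty = [i] := by
  rw [collectB]
  rw [if_neg (by rw [PySem.Set.contains_iff]; exact List.not_mem_nil)]
  have hadd : PySem.Set.add PySem.Set.empty i = [i] := by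
    show PySem.Set.add [] i = [i]
    rw [PySem.Set.add_of_not_mem (List.not_mem_nil)]
    rfl
  rw [hadd]
  exact fold_id_of_no_unvisited n v graph _ _ _ h

theorem flat_case (i n : Int) (v gold : List Int) (graph : List (List (String × Int)))
    (hflat : preFlat i n v gold graph = true) :
    DFS i n v gold graph = DFS_alt i n v gold graph := by
  unfold preFlat at hflat
  simp only [Bool.and_eq_true, Bool.or_eq_true, decide_eq_true_eq, List.all_eq_true] at hflat
  obtain ⟨hbase, hor⟩ := hflat
  have hv1 : -(v.length : Int) ≤ i := hbase.1.1.1.1.1.2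
  have hv2 : i < (v.length : Int) := hbase.1.1.1.1.2
  have hmem : ∀ x : Int, i + pvRowA graph i ≤ x → x < min (i + pvRowB graph i + 1) n →
      pvGetD v x ≠ -1 := by
    rcases hor with hemp | ⟨-, hall⟩
    · intro x h1 h2; omega
    · intro x h1 h2
      exact hall x (PySem.List.mem_pyRange_one.2 ⟨h1, h2⟩)
  show (dfsA (n.toNat + 1) i n v gold graph).1 = _
  rw [dfsA]
  dsimp only
  rw [loop_flat n.toNat n v gold graph
    ((min (i + pvRowB graph i + 1) n) - (i + pvRowA graph i)).toNat
    (i + pvRowA graph i) (i + pvRowB graph i + 1) 0 hmem le_rfl]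
  rw [alt_eq]
  have hreach : reachS i n v graph = [i] := by
    unfold reachS
    apply collect_flat
    intro x hx
    have := PySem.List.mem_pyRange_one.1 hx
    exact hmem x this.1 this.2
  have hsort : sortR i n v graph = [i] := by
    unfold sortR
    rw [hreach]
    exact PySem.List.sorted_rev_eq_of_perm_of_pairwise_gt _ _ _ (List.Perm.refl _)
      (List.pairwise_singleton _ _)
  unfold wB
  rw [hsort]
  simp only [List.foldl_cons, List.foldl_nil]
  unfold dpStep
  dsimp only
  rw [pvGetD_pySetD_self _ _ _ hv1 hv2]
  rfl

-- ===== VERDICT (by name: the statement is the Claim_ definition above) =====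
theorem DFS_spec : Claim_equal_DFS := by
  intro i n v gold graph hdom hpre
  show DFS i n v gold graph = DFS_alt i n v gold graph
  rcases hpre with hflat | hrec
  · exact flat_case i n v gold graph hflat
  · have h0 : 0 ≤ i := hrec.1
    have hin : i < n := hrec.2.1
    have hgood : GoodV i n v gold graph v := ⟨rfl, fun m _ _ => Or.inl rfl⟩
    obtain ⟨hiR, _, _, _, _⟩ := reach_facts i n v gold graph hrec
    have hmain := dfs_main i n v gold graph hrec (n.toNat + 1) i v hiR le_rfl hin
      (Or.inl rfl) hgood (by omega)
    have halt : DFS_alt i n v gold graph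
        = pvGetD gold i + bestB n graph (wB i n v gold graph) i := by
      rw [alt_eq, wrecR i n v gold graph hrec i hiR]
    rw [halt]
    exact hmain.1
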